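-- pv_equiv track=rewrite | github.com/uttambodara/KeyLogger | log_reader.py | caps
-- ===== SOURCE A (Python) =====
-- def caps(line):
--     """
--     Turning letters into uppercase depending on the ~ value
--
--     Args:
--         line [str]: The string that is going to be processed
--
--     Returns:
--         New line of characters with upper case letters
--     """
--     new_line = ''
--     capslock = 'off'
--     for char in line:
--         if char != '`':
--             if capslock == 'on':
--                 try:
--                     char = char.upper()
--                     new_line += char
--                 except:
--                     new_line += char
--             else:
--                 new_line += char
--         if char == '`' and capslock == 'on':
--             capslock = 'off'
--         elif char == '`' and capslock == 'off':
--             capslock = 'on'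
--     return new_line
-- ===== SOURCE B (Python) =====
-- def caps(line):
--     parts = line.split('`')
--     return ''.join(p.upper() if i % 2 == 1 else p for i, p in enumerate(parts))
-- ===== Notes on version B (the rewrite author's own statement) =====
-- stated objective: simpler
-- what changed: Replaces the character-by-character caps-lock toggle state machine with a split on the backtick marker followed by uppercasing the odd-indexed segments and joining; bulk str.split/str.upper/str.join replace per-character string concatenation, which a timing run measured as a constant-factor speedup.
import Mathlib
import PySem

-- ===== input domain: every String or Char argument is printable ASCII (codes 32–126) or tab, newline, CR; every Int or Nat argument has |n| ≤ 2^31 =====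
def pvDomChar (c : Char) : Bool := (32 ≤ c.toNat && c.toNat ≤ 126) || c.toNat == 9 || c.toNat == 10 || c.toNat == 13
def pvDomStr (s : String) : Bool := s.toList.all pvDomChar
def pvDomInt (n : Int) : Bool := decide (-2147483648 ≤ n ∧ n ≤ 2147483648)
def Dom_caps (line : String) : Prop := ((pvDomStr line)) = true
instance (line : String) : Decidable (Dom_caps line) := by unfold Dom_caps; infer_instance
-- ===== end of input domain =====

-- B replaces A's per-character caps-lock toggle state machine by split-on-backtick,
-- uppercase the odd-indexed segments, and join (objective: simpler).

-- ===== PORT A =====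
-- one loop step of A: append the char (upper-cased while capslock is on, backticks skipped),
-- then toggle the capslock flag on a backtick ('on'/'off' string ported as Bool)
def capsStep (st : List Char × Bool) (char : Char) : List Char × Bool :=
  let acc := if char ≠ '`' then
      (if st.2 then st.1 ++ PySem.Chars.upper [char] else st.1 ++ [char])
    else st.1
  let cl := if char = '`' ∧ st.2 then false
    else if char = '`' ∧ ¬ st.2 then true
    else st.2
  (acc, cl)

def caps (line : String) : String :=
  String.ofList (line.toList.foldl capsStep ([], false)).1

-- ===== PORT B =====
def caps_alt (line : String) : String :=
  PySem.Str.join "" ((PySem.List.enumerate ((PySem.Str.split? line "`").getD [])).map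
    (fun p => if PySem.Int.mod p.1 2 = 1 then PySem.Str.upper p.2 else p.2))

-- ===== PRECONDITION & SPEC =====
def Spec_caps (line : String) (out : String) : Prop := out = caps_alt line
instance (line : String) (out : String) : Decidable (Spec_caps line out) := by unfold Spec_caps; infer_instance

-- ===== CLAIM (what is proved, stated in full; the proofs are below) =====
def Claim_equal_caps : Prop := ∀ (line : String), Dom_caps line → Spec_caps line (caps line)

-- ===== LEMMAS AND PROOFS =====

-- reference splitter: split a char list at backticks, `pre` the segment built so far
def sp (pre : List Char) : List Char → List (List Char)
  | [] => [pre]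
  | c :: rest => if c = '`' then pre :: sp [] rest else sp (pre ++ [c]) rest

-- alternating renderer: concatenate segments, uppercasing while the flag is on, toggling per segment
def altRender (on : Bool) : List (List Char) → List Char
  | [] => []
  | p :: ps => (if on then PySem.Chars.upper p else p) ++ altRender (!on) ps

lemma splitOn_go_eq (fuel : Nat) (l cur : List Char) (acc : List (List Char))
    (h : l.length < fuel) :
    PySem.Chars.splitOn.go ['`'] fuel l cur acc = acc.reverse ++ sp cur.reverse l := by
  induction fuel generalizing l cur acc with
  | zero => omega
  | succ f ih =>
    cases l with
    | nil => simp [PySem.Chars.splitOn.go, sp]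
    | cons c rest =>
      by_cases hc : c = '`'
      · subst hc
        have hp : List.isPrefixOf ['`'] ('`' :: rest) = true := by
          simp [List.isPrefixOf]
        simp only [PySem.Chars.splitOn.go, hp, if_pos, List.length_cons, List.drop_succ_cons,
          List.length_nil, List.drop_zero]
        rw [ih rest [] (cur.reverse :: acc) (by simp at h; omega)]
        simp [sp]
      · have hp : List.isPrefixOf ['`'] (c :: rest) = false := by
          simp [List.isPrefixOf]; exact fun hh => (hc hh.symm).elim
        simp only [PySem.Chars.splitOn.go, hp, Bool.false_eq_true, if_false]
        rw [ih rest (c :: cur) acc (by simp at h; omega)]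
        simp [sp, hc]

lemma splitOn_eq_sp (cs : List Char) :
    PySem.Chars.splitOn cs ['`'] = sp [] cs := by
  have := splitOn_go_eq (cs.length + 1) cs [] [] (by omega)
  simpa [PySem.Chars.splitOn] using this

lemma join_nil_flatten (l : List (List Char)) : PySem.Chars.join [] l = l.flatten := by
  induction l with
  | nil => simp [PySem.Chars.join, List.intercalate]
  | cons a t ih =>
    cases t with
    | nil => simp [PySem.Chars.join, List.intercalate]
    | cons b t' =>
      rw [PySem.Chars.join_cons_cons, List.flatten_cons, ← ih]
      simp

-- B's enumerate/parity expression is the alternating renderer, flag = parity of the start index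
lemma enumerate_parity (parts : List (List Char)) (k : Nat) :
    PySem.Chars.join []
      ((PySem.List.enumerate parts (k : Int)).map
        (fun p => if PySem.Int.mod p.1 2 = 1 then PySem.Chars.upper p.2 else p.2))
      = altRender (k % 2 = 1) parts := by
  induction parts generalizing k with
  | nil => simp [PySem.List.enumerate_nil, PySem.Chars.join, List.intercalate, altRender]
  | cons p ps ih =>
    rw [PySem.List.enumerate_cons, List.map_cons, join_nil_flatten, List.flatten_cons,
      ← join_nil_flatten]
    have hk : ((k : Int) + 1) = ((k + 1 : Nat) : Int) := by push_cast; ring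
    have hmod : PySem.Int.mod (k : Int) 2 = ((k % 2 : Nat) : Int) :=
      PySem.Int.mod_natCast k 2
    rw [hk, ih]
    by_cases hpar : k % 2 = 1
    · have hm1 : PySem.Int.mod (k : Int) 2 = 1 := by rw [hmod, hpar]; norm_num
      have h2 : (k + 1) % 2 = 0 := by omega
      rw [if_pos hm1]
      simp [altRender, hpar, h2]
    · have h1 : k % 2 = 0 := by omega
      have h2 : (k + 1) % 2 = 1 := by omega
      have hm1 : PySem.Int.mod (k : Int) 2 ≠ 1 := by rw [hmod, h1]; decide
      rw [if_neg hm1]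
      simp [altRender, hpar, h2]

-- rendering the splitter's output from pre-segment `pre` = emit `pre` (upper-cased if the
-- flag is on) then continue as A's loop does
lemma altRender_sp (rest : List Char) (pre : List Char) (on : Bool) (acc : List Char) :
    acc ++ altRender on (sp pre rest)
      = (rest.foldl capsStep (acc ++ (if on then PySem.Chars.upper pre else pre), on)).1 := by
  induction rest generalizing pre on acc with
  | nil => cases on <;> simp [sp, altRender]
  | cons c cs ih =>
    by_cases hc : c = '`'
    · subst hc
      have h1 : sp pre ('`' :: cs) = pre :: sp [] cs := by simp [sp]
      have h2 : capsStep (acc ++ (if on then PySem.Chars.upper pre else pre), on) '`'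
          = (acc ++ (if on then PySem.Chars.upper pre else pre), !on) := by
        cases on <;> simp [capsStep]
      rw [h1, List.foldl_cons, h2]
      have hi := ih [] (!on) (acc ++ (if on then PySem.Chars.upper pre else pre))
      have hup : ∀ b : Bool, (if b = true then PySem.Chars.upper ([] : List Char) else []) = [] := by
        intro b; cases b <;> simp [PySem.Chars.upper]
      rw [hup, List.append_nil] at hi
      rw [← hi]
      simp [altRender]
    · have h1 : sp pre (c :: cs) = sp (pre ++ [c]) cs := by simp [sp, hc]
      have h2 : capsStep (acc ++ (if on then PySem.Chars.upper pre else pre), on) c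
          = (acc ++ (if on then PySem.Chars.upper (pre ++ [c]) else pre ++ [c]), on) := by
        cases on <;> simp [capsStep, hc, PySem.Chars.upper]
      rw [h1, List.foldl_cons, h2, ih]

lemma enumerate_map' {α β : Type} (f : α → β) (xs : List α) (k : Int) :
    PySem.List.enumerate (xs.map f) k = (PySem.List.enumerate xs k).map (fun p => (p.1, f p.2)) := by
  induction xs generalizing k with
  | nil => simp [PySem.List.enumerate_nil]
  | cons x xs ih => simp [PySem.List.enumerate_cons, ih]

-- ===== VERDICT (by name: the statement is the Claim_ definition above) =====
theorem caps_spec : Claim_equal_caps := by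
  intro line _
  unfold Spec_caps caps caps_alt
  have hsplit : (PySem.Str.split? line "`").getD []
      = (sp [] line.toList).map String.ofList := by
    simp [PySem.Str.split?, PySem.Chars.split?, splitOn_eq_sp]
  rw [hsplit, enumerate_map']
  simp only [PySem.Str.join, List.map_map]
  apply congrArg
  have hfun : (String.toList ∘
        ((fun p : Int × String => if PySem.Int.mod p.1 2 = 1 then PySem.Str.upper p.2 else p.2) ∘
          (fun p : Int × List Char => (p.1, String.ofList p.2))))
      = (fun p : Int × List Char =>
          if PySem.Int.mod p.1 2 = 1 then PySem.Chars.upper p.2 else p.2) := by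
    funext p
    simp [PySem.Str.upper, apply_ite String.toList]
  rw [hfun, show ("" : String).toList = ([] : List Char) from rfl,
    show (0 : Int) = ((0 : Nat) : Int) by norm_num,
    enumerate_parity (sp [] line.toList) 0]
  have hb := altRender_sp line.toList [] false []
  simp only [List.nil_append, Bool.false_eq_true, if_false, List.append_nil] at hb
  rw [← hb]
  norm_num
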